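-- pv_equiv track=rewrite | github.com/Gnanesh09/vantageai-v.1 | backend/utils/directive_engine.py | _feature_summary
-- ===== SOURCE A (Python) =====
-- from typing import Any, Dict, List
--
-- HIGH_RISK_FEATURES = {"safety", "heating_issue", "missing_items", "contamination", "damage"}
--
-- def _feature_summary(feature_sentiments: Dict[str, Dict[str, Any]]) -> Dict[str, Any]:
--     negatives: List[str] = []
--     dangerous: List[str] = []
--     for feature, data in (feature_sentiments or {}).items():
--         sentiment = (data or {}).get("sentiment")
--         if sentiment in {"negative", "mixed"}:
--             negatives.append(feature)
--             if feature in HIGH_RISK_FEATURES: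
--                 dangerous.append(feature)
--     return {"negative_features": negatives, "dangerous_features": dangerous}
-- ===== SOURCE B (Python) =====
-- from typing import Any, Dict, List
--
-- HIGH_RISK_FEATURES = {"safety", "heating_issue", "missing_items", "contamination", "damage"}
--
-- def _feature_summary(feature_sentiments: Dict[str, Dict[str, Any]]) -> Dict[str, Any]:
--     def go(items):
--         # divide and conquer: solve halves independently, concatenate in order
--         if not items:
--             return [], []
--         if len(items) == 1:
--             feature, data = items[0]
--             if (data or {}).get("sentiment") in ("negative", "mixed"):
--                 return [feature], ([feature] if feature in HIGH_RISK_FEATURES else [])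
--             return [], []
--         mid = len(items) // 2
--         ln, ld = go(items[:mid])
--         rn, rd = go(items[mid:])
--         return ln + rn, ld + rd
--
--     negatives, dangerous = go(list((feature_sentiments or {}).items()))
--     return {"negative_features": negatives, "dangerous_features": dangerous}
-- ===== Notes on version B (the rewrite author's own statement) =====
-- stated objective: alternative
-- what changed: Replaces A's single forward loop maintaining two accumulator lists with a divide-and-conquer recursion that splits the items in half, solves each half independently, and concatenates the per-half negative/dangerous lists (correct because both outputs distribute over list concatenation).
import Mathlib
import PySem

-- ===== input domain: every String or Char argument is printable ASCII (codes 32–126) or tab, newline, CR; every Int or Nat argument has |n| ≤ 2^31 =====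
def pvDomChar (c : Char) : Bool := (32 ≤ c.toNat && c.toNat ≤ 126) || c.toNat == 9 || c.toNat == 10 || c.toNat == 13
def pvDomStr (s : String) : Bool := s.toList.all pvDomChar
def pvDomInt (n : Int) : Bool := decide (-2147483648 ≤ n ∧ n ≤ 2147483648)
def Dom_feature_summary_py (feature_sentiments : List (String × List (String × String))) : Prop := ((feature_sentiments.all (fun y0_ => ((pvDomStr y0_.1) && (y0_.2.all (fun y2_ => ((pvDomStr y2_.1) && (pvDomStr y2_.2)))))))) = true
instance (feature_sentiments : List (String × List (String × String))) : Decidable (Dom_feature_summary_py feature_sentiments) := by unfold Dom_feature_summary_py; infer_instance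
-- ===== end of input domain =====

-- B replaces A's single forward two-accumulator loop with a divide-and-conquer
-- recursion over the items (split in half, solve halves, concatenate) — alternative.

-- ===== PORT A =====
def pvHighRisk : PySem.Set String :=
  PySem.Set.ofList ["safety", "heating_issue", "missing_items", "contamination", "damage"]

def feature_summary_py (feature_sentiments : List (String × List (String × String))) : List (String × List String) :=
  -- 'feature_sentiments or {}' iterates the same items; '(data or {})' looks up the same ([] .get = none)
  let st := feature_sentiments.foldl
    (fun (acc : List String × List String) fd =>
      let sentiment := PySem.Dict.get? (PySem.Dict.mk fd.2) "sentiment"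
      if sentiment = some "negative" ∨ sentiment = some "mixed" then
        (acc.1 ++ [fd.1],
         if PySem.Set.contains pvHighRisk fd.1 then acc.2 ++ [fd.1] else acc.2)
      else acc)
    ([], [])
  [("negative_features", st.1), ("dangerous_features", st.2)]

-- ===== PORT B =====
-- Source B's 'go': items[:mid] / items[mid:] with 0 ≤ mid ≤ len are exactly take/drop
def pvGo : List (String × List (String × String)) → List String × List String
  | [] => ([], [])
  | [fd] =>
      let sentiment := PySem.Dict.get? (PySem.Dict.mk fd.2) "sentiment"
      if sentiment = some "negative" ∨ sentiment = some "mixed" then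
        ([fd.1], if PySem.Set.contains pvHighRisk fd.1 then [fd.1] else [])
      else ([], [])
  | a :: b :: rest =>
      let mid := (a :: b :: rest).length / 2
      let l := pvGo ((a :: b :: rest).take mid)
      let r := pvGo ((a :: b :: rest).drop mid)
      (l.1 ++ r.1, l.2 ++ r.2)
  termination_by items => items.length
  decreasing_by
  · simp [List.length_take]; omega
  · simp [List.length_drop]; omega

def feature_summary_py_alt (feature_sentiments : List (String × List (String × String))) : List (String × List String) :=
  let st := pvGo feature_sentiments
  [("negative_features", st.1), ("dangerous_features", st.2)]

-- ===== PRECONDITION & SPEC =====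
def Spec_feature_summary_py (feature_sentiments : List (String × List (String × String))) (out : List (String × List String)) : Prop := out = feature_summary_py_alt feature_sentiments
instance (feature_sentiments : List (String × List (String × String))) (out : List (String × List String)) : Decidable (Spec_feature_summary_py feature_sentiments out) := by unfold Spec_feature_summary_py; infer_instance

-- ===== CLAIM =====
def Claim_equal_feature_summary_py : Prop := ∀ (feature_sentiments : List (String × List (String × String))), Dom_feature_summary_py feature_sentiments → Spec_feature_summary_py feature_sentiments (feature_summary_py feature_sentiments)

-- ===== LEMMAS AND PROOFS =====

-- per-item predicates shared by the two characterisations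
def pvNegP (fd : String × List (String × String)) : Bool :=
  PySem.Dict.get? (PySem.Dict.mk fd.2) "sentiment" == some "negative" ||
  PySem.Dict.get? (PySem.Dict.mk fd.2) "sentiment" == some "mixed"

-- B's divide-and-conquer computes the filtered lists (both components distribute over ++)
theorem pvGo_eq (fs : List (String × List (String × String))) :
    pvGo fs = ((fs.filter pvNegP).map Prod.fst,
               ((fs.filter pvNegP).map Prod.fst).filter (fun f => PySem.Set.contains pvHighRisk f)) := by
  induction fs using pvGo.induct with
  | case1 => simp [pvGo]
  | case2 fd _sent hs =>
    have hs' : PySem.Dict.get? (PySem.Dict.mk fd.2) "sentiment" = some "negative" ∨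
        PySem.Dict.get? (PySem.Dict.mk fd.2) "sentiment" = some "mixed" := hs
    have hb : pvNegP fd = true := by rcases hs' with h | h <;> simp [pvNegP, h]
    simp [pvGo, if_pos hs', hb, List.filter_cons]
  | case3 fd _sent hs =>
    have hs' : ¬(PySem.Dict.get? (PySem.Dict.mk fd.2) "sentiment" = some "negative" ∨
        PySem.Dict.get? (PySem.Dict.mk fd.2) "sentiment" = some "mixed") := hs
    have hb : pvNegP fd = false := by
      push Not at hs'; simp [pvNegP, hs'.1, hs'.2]
    simp [pvGo, if_neg hs', hb]
  | case4 a b rest _mid ih1 ih2 =>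
    have h2 : List.filter pvNegP (a :: b :: rest) =
        List.filter pvNegP (List.take _mid (a :: b :: rest)) ++
        List.filter pvNegP (List.drop _mid (a :: b :: rest)) := by
      rw [← List.filter_append, List.take_append_drop]
    rw [pvGo, ih1, ih2]
    simp [h2, List.map_append, List.filter_append]

-- A's loop, started from any accumulators, appends the same two filtered lists
theorem pv_loop_eq (fs : List (String × List (String × String))) (n d : List String) :
    fs.foldl
      (fun (acc : List String × List String) fd =>
        let sentiment := PySem.Dict.get? (PySem.Dict.mk fd.2) "sentiment"
        if sentiment = some "negative" ∨ sentiment = some "mixed" then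
          (acc.1 ++ [fd.1],
           if PySem.Set.contains pvHighRisk fd.1 then acc.2 ++ [fd.1] else acc.2)
        else acc)
      (n, d)
    = (n ++ (fs.filter pvNegP).map Prod.fst,
       d ++ ((fs.filter pvNegP).map Prod.fst).filter (fun f => PySem.Set.contains pvHighRisk f)) := by
  induction fs generalizing n d with
  | nil => simp
  | cons hd tl ih =>
    simp only [List.foldl_cons, List.filter_cons]
    by_cases hs : PySem.Dict.get? (PySem.Dict.mk hd.2) "sentiment" = some "negative" ∨
        PySem.Dict.get? (PySem.Dict.mk hd.2) "sentiment" = some "mixed"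
    · have hb : pvNegP hd = true := by rcases hs with h | h <;> simp [pvNegP, h]
      rw [if_pos hs, ih]
      by_cases hr : hd.1 ∈ pvHighRisk
      · simp [hb, hr, PySem.Set.contains]
      · simp [hb, hr, PySem.Set.contains]
    · have hb : pvNegP hd = false := by
        push Not at hs; simp [pvNegP, hs.1, hs.2]
      rw [if_neg hs, ih]
      simp [hb]

-- ===== VERDICT =====
theorem feature_summary_py_spec : Claim_equal_feature_summary_py := by
  intro fs _
  unfold Spec_feature_summary_py feature_summary_py feature_summary_py_alt
  rw [pv_loop_eq, pvGo_eq]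
  simp
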